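-- pv_equiv track=rewrite | github.com/lily03060402/PaperComparisonSystem | display/choose_paper/PaperCompare/data_process_final.py | Paperid2SubspaceAllSentences
-- ===== SOURCE A (Python) =====
-- def Paperid2SubspaceAllSentences(sentence_textcnn_list,subId):
--     SubSpace_dict={}
--     paper_id_list=[]
--     for each in sentence_textcnn_list:
--         if each[-2]==subId:
--             paper_id=each[1]
--             if paper_id in paper_id_list:
--                 SubSpace_dict[paper_id]=SubSpace_dict[paper_id]+each[-1]
--             else:
--                 SubSpace_dict[paper_id]=each[-1]
--             paper_id_list.append(paper_id)
--
--     return SubSpace_dict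
-- ===== SOURCE B (Python) =====
-- def Paperid2SubspaceAllSentences(sentence_textcnn_list, subId):
--     groups = {}
--     for each in sentence_textcnn_list:
--         if each[-2] == subId:
--             groups.setdefault(each[1], []).append(each[-1])
--     result = {}
--     for pid, vals in groups.items():
--         total = vals[0]
--         for v in vals[1:]:
--             total = total + v
--         result[pid] = total
--     return result
-- ===== Notes on version B (the rewrite author's own statement) =====
-- stated objective: alternative
-- what changed: Single accumulate-with-membership-list loop replaced by a grouping pass into a dict of lists (first-appearance key order) followed by a separate per-key reduction pass.
import Mathlib
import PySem

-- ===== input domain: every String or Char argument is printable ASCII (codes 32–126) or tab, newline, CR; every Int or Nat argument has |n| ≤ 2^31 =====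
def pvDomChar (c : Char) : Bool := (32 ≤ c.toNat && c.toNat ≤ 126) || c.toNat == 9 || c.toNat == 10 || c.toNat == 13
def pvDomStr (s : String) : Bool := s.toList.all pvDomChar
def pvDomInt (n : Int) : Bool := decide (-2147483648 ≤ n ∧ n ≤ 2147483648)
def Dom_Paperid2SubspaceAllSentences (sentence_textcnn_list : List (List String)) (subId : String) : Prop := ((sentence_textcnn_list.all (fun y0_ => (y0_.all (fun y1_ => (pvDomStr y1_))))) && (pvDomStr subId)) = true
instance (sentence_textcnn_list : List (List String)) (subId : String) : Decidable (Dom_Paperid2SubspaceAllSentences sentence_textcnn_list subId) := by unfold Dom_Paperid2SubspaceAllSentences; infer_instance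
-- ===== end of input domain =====

-- B replaces A's accumulate-with-membership-list loop by a grouping pass (dict of lists, first-appearance key order) plus a separate reduction pass; return value only.

-- ===== PORT A =====
-- Python dict as an association list, exact: overwrite keeps position, new keys append; lookup = first match.
def pvDictSet (d : List (String × String)) (k v : String) : List (String × String) :=
  match d with
  | [] => [(k, v)]
  | (k', v') :: rest => if k' == k then (k, v) :: rest else (k', v') :: pvDictSet rest k v

def pvDictGetD (d : List (String × String)) (k dflt : String) : String :=
  match d with
  | [] => dflt
  | (k', v') :: rest => if k' == k then v' else pvDictGetD rest k dflt

def pvAStep (subId : String) (st : List (String × String) × List String) (each : List String) :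
    List (String × String) × List String :=
  match PySem.List.pyGet? each (-2) with
  | none => st                                  -- A raises here; outside Pre_
  | some sid =>
    if sid == subId then
      match PySem.List.pyGet? each 1, PySem.List.pyGet? each (-1) with
      | some paper_id, some last =>
        ((if st.2.contains paper_id
          then pvDictSet st.1 paper_id (pvDictGetD st.1 paper_id "" ++ last)
          else pvDictSet st.1 paper_id last), st.2 ++ [paper_id])
      | _, _ => st                              -- unreachable when each[-2] exists
    else st

def Paperid2SubspaceAllSentences (sentence_textcnn_list : List (List String)) (subId : String) : List (String × String) :=
  (sentence_textcnn_list.foldl (pvAStep subId) ([], [])).1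

-- ===== PORT B =====
-- groups.setdefault(each[1], []).append(each[-1]) on an insertion-ordered dict of lists
def pvAddTo (g : List (String × List String)) (k v : String) : List (String × List String) :=
  match g with
  | [] => [(k, [v])]
  | (k', vs) :: rest => if k' == k then (k', vs ++ [v]) :: rest else (k', vs) :: pvAddTo rest k v

def pvBStep (subId : String) (g : List (String × List String)) (each : List String) :
    List (String × List String) :=
  match PySem.List.pyGet? each (-2) with
  | none => g
  | some sid =>
    if sid == subId then
      match PySem.List.pyGet? each 1, PySem.List.pyGet? each (-1) with
      | some paper_id, some last => pvAddTo g paper_id last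
      | _, _ => g
    else g

-- total = vals[0]; for v in vals[1:]: total = total + v   (groups are never empty in Source B)
def pvRed (vs : List String) : String :=
  match vs with
  | [] => ""
  | v :: rest => rest.foldl (· ++ ·) v

def Paperid2SubspaceAllSentences_alt (sentence_textcnn_list : List (List String)) (subId : String) : List (String × String) :=
  (sentence_textcnn_list.foldl (pvBStep subId) []).map (fun p => (p.1, pvRed p.2))

-- ===== PRECONDITION & SPEC =====
-- A evaluates each[-2] on every row, so it raises IndexError exactly when some row has fewer than 2 elements.
def Pre_Paperid2SubspaceAllSentences (sentence_textcnn_list : List (List String)) (subId : String) : Prop :=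
  ∀ row ∈ sentence_textcnn_list, 2 ≤ row.length

instance (sentence_textcnn_list : List (List String)) (subId : String) : Decidable (Pre_Paperid2SubspaceAllSentences sentence_textcnn_list subId) := by unfold Pre_Paperid2SubspaceAllSentences; infer_instance

def pvWitness_Paperid2SubspaceAllSentences : List (List String) × String :=
  ([["a", "p1", "x", "hello "], ["b", "p1", "x", "world"], ["c", "p2", "y", "z"]], "x")

def Spec_Paperid2SubspaceAllSentences (sentence_textcnn_list : List (List String)) (subId : String) (out : List (String × String)) : Prop := out = Paperid2SubspaceAllSentences_alt sentence_textcnn_list subId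
instance (sentence_textcnn_list : List (List String)) (subId : String) (out : List (String × String)) : Decidable (Spec_Paperid2SubspaceAllSentences sentence_textcnn_list subId out) := by unfold Spec_Paperid2SubspaceAllSentences; infer_instance

-- ===== CLAIM (what is proved, stated in full; the proofs are below) =====
def Claim_equal_Paperid2SubspaceAllSentences : Prop := ∀ (sentence_textcnn_list : List (List String)) (subId : String), Dom_Paperid2SubspaceAllSentences sentence_textcnn_list subId → Pre_Paperid2SubspaceAllSentences sentence_textcnn_list subId → Spec_Paperid2SubspaceAllSentences sentence_textcnn_list subId (Paperid2SubspaceAllSentences sentence_textcnn_list subId)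

-- ===== LEMMAS AND PROOFS =====

def pvMapG (g : List (String × List String)) : List (String × String) :=
  g.map (fun p => (p.1, pvRed p.2))

lemma pvRed_append (vs : List String) (v : String) (h : vs ≠ []) :
    pvRed (vs ++ [v]) = pvRed vs ++ v := by
  cases vs with
  | nil => simp at h
  | cons a r => simp [pvRed, List.foldl_append]

lemma pvAddTo_nonempty (g : List (String × List String)) (k v : String)
    (h : ∀ p ∈ g, p.2 ≠ []) : ∀ p ∈ pvAddTo g k v, p.2 ≠ [] := by
  induction g with
  | nil => intro p hp; simp [pvAddTo] at hp; simp [hp]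
  | cons hd tl ih =>
    obtain ⟨k', vs⟩ := hd
    intro p hp
    by_cases hk : k' = k
    · subst hk
      simp [pvAddTo] at hp
      rcases hp with hp | hp
      · simp [hp]
      · exact h p (List.mem_cons_of_mem _ hp)
    · simp [pvAddTo, beq_iff_eq, hk] at hp
      rcases hp with hp | hp
      · rw [hp]; exact h (k', vs) (by simp)
      · exact ih (fun q hq => h q (List.mem_cons_of_mem _ hq)) p hp

lemma mem_pvAddTo_keys (g : List (String × List String)) (k v q : String) :
    q ∈ (pvAddTo g k v).map Prod.fst ↔ q ∈ g.map Prod.fst ∨ q = k := by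
  induction g with
  | nil => simp [pvAddTo]
  | cons hd tl ih =>
    obtain ⟨k', vs⟩ := hd
    by_cases hk : k' = k
    · subst hk
      simp only [pvAddTo, beq_self_eq_true, if_true]
      simp
      tauto
    · simp only [pvAddTo, beq_iff_eq, hk, if_false]
      simp [ih]
      tauto

lemma pvMapG_addTo (g : List (String × List String)) (k v : String)
    (hne : ∀ p ∈ g, p.2 ≠ []) :
    pvMapG (pvAddTo g k v)
      = pvDictSet (pvMapG g) k
          (if k ∈ g.map Prod.fst then pvDictGetD (pvMapG g) k "" ++ v else v) := by
  induction g with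
  | nil => simp [pvAddTo, pvMapG, pvDictSet, pvRed]
  | cons hd tl ih =>
    obtain ⟨k', vs⟩ := hd
    by_cases hk : k' = k
    · subst hk
      have hvs : vs ≠ [] := hne (k', vs) (by simp)
      simp [pvAddTo, pvMapG, pvDictSet, pvDictGetD, pvRed_append vs v hvs]
    · have htl := ih (fun q hq => hne q (List.mem_cons_of_mem _ hq))
      by_cases hm : k ∈ tl.map Prod.fst <;>
        simp [pvAddTo, pvMapG, pvDictSet, pvDictGetD, beq_iff_eq, hk, Ne.symm hk, hm, htl] at * <;>
        simpa [hm] using htl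

lemma pv_main (l : List (List String)) (subId : String)
    (g : List (String × List String)) (d : List (String × String)) (pl : List String)
    (hd : d = pvMapG g)
    (hpl : ∀ q : String, q ∈ pl ↔ q ∈ g.map Prod.fst)
    (hne : ∀ p ∈ g, p.2 ≠ []) :
    (l.foldl (pvAStep subId) (d, pl)).1 = pvMapG (l.foldl (pvBStep subId) g) := by
  induction l generalizing g d pl with
  | nil => simpa using hd
  | cons each rest ih =>
    simp only [List.foldl_cons]
    cases hget : PySem.List.pyGet? each (-2) with
    | none =>
      simp only [pvAStep, pvBStep, hget]
      exact ih g d pl hd hpl hne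
    | some sid =>
      by_cases hs : (sid == subId) = true
      · cases hget1 : PySem.List.pyGet? each 1 with
        | none =>
          simp only [pvAStep, pvBStep, hget, hs, if_true, hget1]
          exact ih g d pl hd hpl hne
        | some pid =>
          cases hgetl : PySem.List.pyGet? each (-1) with
          | none =>
            simp only [pvAStep, pvBStep, hget, hs, if_true, hget1, hgetl]
            exact ih g d pl hd hpl hne
          | some last =>
            simp only [pvAStep, pvBStep, hget, hs, if_true, hget1, hgetl]
            apply ih (pvAddTo g pid last) _ _ ?_ ?_ (pvAddTo_nonempty g pid last hne)
            · rw [pvMapG_addTo g pid last hne, hd]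
              by_cases hm : pid ∈ g.map Prod.fst
              · have hin : pid ∈ pl := (hpl pid).2 hm
                simp [hm, hin]
              · have hnin : pid ∉ pl := fun h => hm ((hpl pid).1 h)
                simp [hm, hnin]
            · intro q
              simp [mem_pvAddTo_keys, hpl q]
      · simp only [pvAStep, pvBStep, hget, hs, if_false]
        exact ih g d pl hd hpl hne

-- ===== VERDICT (by name: the statement is the Claim_ definition above) =====
theorem Paperid2SubspaceAllSentences_spec : Claim_equal_Paperid2SubspaceAllSentences := by
  intro l subId _ _
  unfold Spec_Paperid2SubspaceAllSentences Paperid2SubspaceAllSentences Paperid2SubspaceAllSentences_alt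
  exact pv_main l subId [] [] [] rfl (fun q => Iff.rfl) (by simp)
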